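-- pv_equiv track=rewrite | github.com/msaedi/instructly | backend/app/utils/database_safety.py | is_hosted_database_hostname
-- ===== SOURCE A (Python) =====
-- HOSTED_DATABASE_HOST_PATTERNS = (
--     "supabase.com",
--     "supabase.co",
--     "pooler.supabase.com",
-- )
--
-- def is_hosted_database_hostname(hostname: str) -> bool:
--     normalized = (hostname or "").strip().lower()
--     if not normalized:
--         return False
--     return any(
--         normalized == pattern or normalized.endswith(f".{pattern}")
--         for pattern in HOSTED_DATABASE_HOST_PATTERNS
--     )
-- ===== SOURCE B (Python) =====
-- _HOSTED_SUFFIX_SET = frozenset((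
--     "supabase.com",
--     "supabase.co",
--     "pooler.supabase.com",
-- ))
--
-- def is_hosted_database_hostname(hostname: str) -> bool:
--     suffix = (hostname or "").strip().lower()
--     while suffix:
--         if suffix in _HOSTED_SUFFIX_SET:
--             return True
--         _, _, suffix = suffix.partition(".")
--     return False
-- ===== Notes on version B (the rewrite author's own statement) =====
-- stated objective: idiomatic
-- what changed: Replaces the scan over the pattern tuple with equality/endswith tests by a walk down the hostname's dot-boundary suffixes (partition on '.') with O(1) frozenset membership at each step.
import Mathlib
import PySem

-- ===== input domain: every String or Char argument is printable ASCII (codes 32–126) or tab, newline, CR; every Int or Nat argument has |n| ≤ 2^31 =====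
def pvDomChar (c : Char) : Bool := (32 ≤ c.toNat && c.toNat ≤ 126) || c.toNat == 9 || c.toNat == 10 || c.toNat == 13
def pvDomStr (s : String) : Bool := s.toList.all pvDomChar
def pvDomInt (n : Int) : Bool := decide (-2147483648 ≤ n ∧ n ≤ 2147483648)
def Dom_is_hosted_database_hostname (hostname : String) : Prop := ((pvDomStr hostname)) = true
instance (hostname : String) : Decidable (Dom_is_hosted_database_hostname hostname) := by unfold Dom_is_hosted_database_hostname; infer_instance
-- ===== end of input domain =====

-- B walks the hostname's dot-boundary suffixes with a set lookup instead of scanning the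
-- pattern tuple with ==/endswith; idiomatic restructuring, same observable behaviour.


-- ===== PORT A =====
-- HOSTED_DATABASE_HOST_PATTERNS (a tuple of str, kept as a list of char-lists; strings are
-- ported at the List Char level via PySem.Chars, exact on the ASCII domain)
def pvPatterns : List (List Char) :=
  ["supabase.com".toList, "supabase.co".toList, "pooler.supabase.com".toList]

def is_hosted_database_hostname (hostname : String) : Bool :=
  -- normalized = (hostname or "").strip().lower()   ('or ""' is the identity on str input)
  let normalized := PySem.Chars.lower (PySem.Chars.strip hostname.toList)
  -- if not normalized: return False
  if normalized = [] then false
  else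
    -- any(normalized == pattern or normalized.endswith(f".{pattern}") for pattern in …)
    pvPatterns.any (fun pattern =>
      normalized == pattern || PySem.Chars.endswith normalized ('.' :: pattern))

-- ===== PORT B =====
-- _HOSTED_SUFFIX_SET = frozenset((...))
def pvHostedSuffixSet : PySem.Set (List Char) :=
  PySem.Set.ofList ["supabase.com".toList, "supabase.co".toList, "pooler.supabase.com".toList]

-- while suffix: if suffix in _HOSTED_SUFFIX_SET: return True; _, _, suffix = suffix.partition('.')
-- (partition('.') leaves as third component the part after the first '.', or "" if none:
--  that is (dropWhile (· != '.')).tail, exact)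
def pvSuffixLoop (suffix : List Char) : Bool :=
  if h : suffix = [] then false
  else if pvHostedSuffixSet.contains suffix then true
  else pvSuffixLoop ((suffix.dropWhile (fun c => c != '.')).tail)
termination_by suffix.length
decreasing_by
  have h1 := List.length_dropWhile_le (p := fun c : Char => c != '.') (l := suffix)
  cases suffix with
  | nil => exact absurd rfl h
  | cons a t =>
    by_cases hp : (a != '.') = true
    · simp [hp] at h1 ⊢; omega
    · simp [hp]

def is_hosted_database_hostname_alt (hostname : String) : Bool :=
  pvSuffixLoop (PySem.Chars.lower (PySem.Chars.strip hostname.toList))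

-- ===== PRECONDITION & SPEC =====
def Spec_is_hosted_database_hostname (hostname : String) (out : Bool) : Prop := out = is_hosted_database_hostname_alt hostname
instance (hostname : String) (out : Bool) : Decidable (Spec_is_hosted_database_hostname hostname out) := by unfold Spec_is_hosted_database_hostname; infer_instance

-- ===== CLAIM (what is proved, stated in full; the proofs are below) =====
def Claim_equal_is_hosted_database_hostname : Prop := ∀ (hostname : String), Dom_is_hosted_database_hostname hostname → Spec_is_hosted_database_hostname hostname (is_hosted_database_hostname hostname)

-- ===== LEMMAS AND PROOFS =====

-- A's check, as a function of the (already normalized) char list; with no emptiness guard,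
-- since on [] every disjunct is false anyway.
def pvCheckAll (l : List Char) : Bool :=
  pvPatterns.any (fun pattern => l == pattern || PySem.Chars.endswith l ('.' :: pattern))

lemma pv_guard_eq_checkAll (m : List Char) :
    (if m = [] then false
     else pvPatterns.any (fun pattern => m == pattern || PySem.Chars.endswith m ('.' :: pattern)))
      = pvCheckAll m := by
  by_cases h : m = []
  · rw [h]; decide
  · simp [h, pvCheckAll]

-- B's frozenset holds exactly A's patterns
lemma pv_set_eq_patterns : (pvHostedSuffixSet : List (List Char)) = pvPatterns := by decide

-- the dotted-suffix splitting lemma: for dot-free u,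
-- '.p' is a suffix of "u.r" iff p = r or '.p' is a suffix of r.
lemma pv_dot_suffix_split (u r p : List Char) (hu : '.' ∉ u) :
    ('.' :: p) <:+ (u ++ '.' :: r) ↔ (p = r ∨ ('.' :: p) <:+ r) := by
  constructor
  · intro h
    have hr : ('.' :: r) <:+ (u ++ '.' :: r) := List.suffix_append u _
    rcases List.suffix_or_suffix_of_suffix h hr with h1 | h1
    · rcases List.suffix_cons_iff.mp h1 with h2 | h2
      · exact Or.inl (by simpa using h2)
      · exact Or.inr h2
    · -- '.r' is a suffix of '.p'; if strictly shorter, u would contain a '.'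
      by_cases hlen : ('.' :: p).length ≤ ('.' :: r).length
      · have e1 := List.IsSuffix.length_le h1
        have := List.IsSuffix.eq_of_length h1
          (by simp only [List.length_cons] at hlen e1 ⊢; omega)
        exact Or.inl (by simpa using this.symm)
      · -- '.p' = w ++ '.r' with w nonempty
        obtain ⟨w, hw⟩ := h1
        cases w with
        | nil => simp at hw; simp [hw] at hlen
        | cons c w' =>
          have hc : c = '.' := by
            have := congrArg (List.head? ·) hw
            simpa using this
          subst hc
          have hp : p = w' ++ '.' :: r := by
            have := congrArg List.tail hw
            simpa using this.symm
          obtain ⟨v, hv⟩ := h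
          rw [hp] at hv
          have hv' : (v ++ '.' :: w') ++ ('.' :: r) = u ++ ('.' :: r) := by
            simpa using hv
          have : v ++ '.' :: w' = u := List.append_cancel_right hv'
          exact absurd (this ▸ (by simp : '.' ∈ v ++ '.' :: w')) hu
  · rintro (rfl | h)
    · exact List.suffix_append u _
    · exact h.trans ((List.suffix_cons '.' r).trans (List.suffix_append u _))

-- a dot-free list has no '.pattern' suffix
lemma pv_no_dot_no_suffix (l p : List Char) (hl : '.' ∉ l) : ¬ ('.' :: p) <:+ l := by
  intro h
  exact hl (h.subset (by simp))

-- a list not in the pattern set is == no pattern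
lemma pv_not_mem_beq (l : List Char) (hmem : pvHostedSuffixSet.contains l = false) :
    ∀ pattern ∈ pvPatterns, (l == pattern) = false := by
  intro pattern hp
  by_contra hbe
  have hlp : l = pattern := by
    cases hb : (l == pattern) with
    | false => exact absurd hb hbe
    | true => exact eq_of_beq hb
  subst hlp
  rw [pvHostedSuffixSet.eq_1] at hmem
  revert hmem
  fin_cases hp <;> decide

-- pvCheckAll is invariant under dropping the part up to and including the first dot
lemma pv_checkAll_step (l : List Char)
    (hmem : pvHostedSuffixSet.contains l = false) :
    pvCheckAll l = pvCheckAll ((l.dropWhile (fun c => c != '.')).tail) := by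
  have hnotpat := pv_not_mem_beq l hmem
  have hdec := List.takeWhile_append_dropWhile (p := fun c : Char => c != '.') (l := l)
  have hudot : '.' ∉ l.takeWhile (fun c : Char => c != '.') := by
    intro hmemu
    have := List.mem_takeWhile_imp (p := fun c : Char => c != '.') (l := l) hmemu
    simp at this
  cases hdcase : l.dropWhile (fun c : Char => c != '.') with
  | nil =>
    -- no dot in l; both sides reduce to the plain equality tests, all false
    have hldot : '.' ∉ l := by
      rw [← hdec, hdcase]
      simpa using hudot
    have hfalse : pvCheckAll l = false := by
      unfold pvCheckAll
      rw [List.any_eq_false]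
      intro pattern hp htrue
      rcases Bool.or_eq_true_iff.mp htrue with h | h
      · rw [hnotpat pattern hp] at h; exact Bool.false_ne_true h
      · exact pv_no_dot_no_suffix l pattern hldot ((PySem.Chars.endswith_iff _ _).mp h)
    rw [hfalse]; decide
  | cons c r =>
    have hc : c = '.' := by
      have hh := List.head_dropWhile_not (p := fun c : Char => c != '.') (l := l)
        (by simp [hdcase])
      simp [hdcase] at hh; exact hh
    subst hc
    have hl : l = l.takeWhile (fun c : Char => c != '.') ++ '.' :: r := by
      rw [← hdcase]; exact hdec.symm
    simp only [List.tail_cons]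
    unfold pvCheckAll
    apply PySem.List.any_congr_mem
    intro pattern hp
    rw [hnotpat pattern hp, Bool.false_or, Bool.eq_iff_iff]
    simp only [Bool.or_eq_true, beq_iff_eq, PySem.Chars.endswith_iff]
    rw [hl, pv_dot_suffix_split _ _ _ hudot]
    constructor
    · rintro (rfl | h)
      · exact Or.inl rfl
      · exact Or.inr h
    · rintro (h | h)
      · exact Or.inl h.symm
      · exact Or.inr h

-- the suffix walk computes A's pattern scan
lemma pv_loop_eq_checkAll (l : List Char) : pvSuffixLoop l = pvCheckAll l := by
  induction l using pvSuffixLoop.induct with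
  | case1 =>
    rw [pvSuffixLoop]; decide
  | case2 l h hc =>
    rw [pvSuffixLoop]
    simp only [h, dite_false, hc, if_true]
    have hmem : l ∈ pvPatterns := by
      rw [← pv_set_eq_patterns]
      exact List.mem_of_elem_eq_true hc
    symm
    unfold pvCheckAll
    rw [List.any_eq_true]
    exact ⟨l, hmem, by simp⟩
  | case3 l h hc ih =>
    rw [pvSuffixLoop]
    rw [dif_neg h, if_neg hc]
    rw [ih]
    exact (pv_checkAll_step l (by simpa using hc)).symm

-- ===== VERDICT (by name: the statement is the Claim_ definition above) =====
theorem is_hosted_database_hostname_spec : Claim_equal_is_hosted_database_hostname := by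
  intro hostname _
  unfold Spec_is_hosted_database_hostname is_hosted_database_hostname is_hosted_database_hostname_alt
  rw [pv_loop_eq_checkAll]
  exact pv_guard_eq_checkAll _
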